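-- pv_equiv track=rewrite | github.com/TungDucVu/Assembler | assembler.py | s_type_instruction
-- ===== SOURCE A (Python) =====
-- def s_type_instruction(rs1, rs2, imm):
--     opcode = 0b0100011
--     funct3 = 0b010
--     if imm >= 0:
--         imm = format(imm & ((1 << 12) - 1), '012b')
--     else:
--         imm = format(-imm & ((1 << 12) - 1), '012b')
--         inverted = ''.join('1' if bit == '0' else '0' for bit in imm)
--         twos_comp = bin(int(inverted, 2) + 1)
--         imm = twos_comp
--     imm = int(imm,2)
--     imm3 = imm & 0b11111
--     imm5 = (imm >> 5) & 0b1111111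
--     return format((imm5 << 25) | (rs2 << 20) | (rs1 << 15) | (funct3 << 12) | (imm3 << 7) | opcode, '032b')
-- ===== SOURCE B (Python) =====
-- def s_type_instruction(rs1, rs2, imm):
--     imm12 = imm & 0xFFF
--     imm3 = imm12 & 0b11111
--     imm5 = (imm12 >> 5) & 0b1111111
--     return format((imm5 << 25) | (rs2 << 20) | (rs1 << 15) | (0b010 << 12) | (imm3 << 7) | 0b0100011, '032b')
-- ===== Notes on version B (the rewrite author's own statement) =====
-- stated objective: simpler
-- what changed: B drops A's sign branch, per-bit string-inversion loop and binary re-parse, computing the 12-bit two's-complement immediate directly as imm & 0xFFF before packing the fields.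
import Mathlib
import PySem

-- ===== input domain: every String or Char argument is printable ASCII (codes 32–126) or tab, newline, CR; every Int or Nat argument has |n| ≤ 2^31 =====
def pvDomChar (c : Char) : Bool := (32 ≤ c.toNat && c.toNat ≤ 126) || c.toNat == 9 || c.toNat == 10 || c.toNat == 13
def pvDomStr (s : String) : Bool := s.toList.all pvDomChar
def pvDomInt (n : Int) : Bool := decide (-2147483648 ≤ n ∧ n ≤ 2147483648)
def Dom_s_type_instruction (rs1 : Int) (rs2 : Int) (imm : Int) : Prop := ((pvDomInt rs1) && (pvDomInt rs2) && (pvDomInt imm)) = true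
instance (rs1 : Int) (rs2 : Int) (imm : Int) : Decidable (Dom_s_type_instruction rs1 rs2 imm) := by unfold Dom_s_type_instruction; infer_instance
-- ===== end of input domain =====

-- B replaces A's sign branch, per-bit string inversion and binary re-parse by direct
-- two's-complement masking arithmetic on the immediate (objective: simpler).

-- shared ports of Python built-ins --

-- binary digit characters of n, most significant first (empty for 0); exact digits of format(n,'b') for n > 0
def pyBits (n : Nat) : List Char :=
  ((Nat.digits 2 n).map (fun d => if d = 1 then '1' else '0')).reverse

-- port of format(z, '0<w>b'): zero-padded to width w, sign included in the width; exact for any int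
def pyFormatB (z : Int) (w : Nat) : String :=
  if z < 0 then
    String.ofList ('-' :: (List.replicate ((w - 1) - (pyBits z.natAbs).length) '0' ++ pyBits z.natAbs))
  else
    String.ofList (List.replicate (w - (pyBits z.toNat).length) '0' ++ pyBits z.toNat)

-- port of bin(z); exact for any int (bin(0) = '0b0')
def pyBin (z : Int) : String :=
  if z < 0 then String.ofList ('-' :: '0' :: 'b' :: (if z.natAbs = 0 then ['0'] else pyBits z.natAbs))
  else String.ofList ('0' :: 'b' :: (if z.toNat = 0 then ['0'] else pyBits z.toNat))

-- port of int(s, 2); exact on the strings it receives here: nonempty '0'/'1' digit strings with an optional '0b' prefix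
def pyParseBin (s : String) : Int :=
  let l := s.toList
  let l := if l.take 2 = ['0', 'b'] then l.drop 2 else l
  l.foldl (fun a c => 2 * a + (if c = '1' then 1 else 0)) 0

-- ===== PORT A =====
def s_type_instruction (rs1 : Int) (rs2 : Int) (imm : Int) : String :=
  let opcode : Int := 35      -- 0b0100011
  let funct3 : Int := 2       -- 0b010
  let immS : String :=
    if imm ≥ 0 then
      pyFormatB (Int.land imm 4095) 12              -- imm & ((1 << 12) - 1)
    else
      let s := pyFormatB (Int.land (-imm) 4095) 12  -- -imm & ((1 << 12) - 1)
      let inverted := String.ofList (s.toList.map (fun bit => if bit = '0' then '1' else '0'))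
      pyBin (pyParseBin inverted + 1)               -- twos_comp = bin(int(inverted, 2) + 1)
  let immv : Int := pyParseBin immS                 -- imm = int(imm, 2)
  let imm3 : Int := Int.land immv 31                -- imm & 0b11111
  let imm5 : Int := Int.land (Int.fdiv immv 32) 127 -- (imm >> 5) & 0b1111111 ; Python >> floors
  -- (imm5 << 25) | (rs2 << 20) | (rs1 << 15) | (funct3 << 12) | (imm3 << 7) | opcode, left-associated as in Python
  pyFormatB (Int.lor (Int.lor (Int.lor (Int.lor (Int.lor (imm5 * 2 ^ 25) (rs2 * 2 ^ 20)) (rs1 * 2 ^ 15)) (funct3 * 2 ^ 12)) (imm3 * 2 ^ 7)) opcode) 32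

-- ===== PORT B =====
def s_type_instruction_alt (rs1 : Int) (rs2 : Int) (imm : Int) : String :=
  let imm12 : Int := Int.land imm 4095                -- imm & 0xFFF
  let imm3 : Int := Int.land imm12 31                 -- imm12 & 0b11111
  let imm5 : Int := Int.land (Int.fdiv imm12 32) 127  -- (imm12 >> 5) & 0b1111111
  pyFormatB (Int.lor (Int.lor (Int.lor (Int.lor (Int.lor (imm5 * 2 ^ 25) (rs2 * 2 ^ 20)) (rs1 * 2 ^ 15)) (2 * 2 ^ 12)) (imm3 * 2 ^ 7)) 35) 32

-- ===== PRECONDITION & SPEC =====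
def Spec_s_type_instruction (rs1 : Int) (rs2 : Int) (imm : Int) (out : String) : Prop := out = s_type_instruction_alt rs1 rs2 imm
instance (rs1 : Int) (rs2 : Int) (imm : Int) (out : String) : Decidable (Spec_s_type_instruction rs1 rs2 imm out) := by unfold Spec_s_type_instruction; infer_instance

-- ===== CLAIM (what is proved, stated in full; the proofs are below) =====
def Claim_equal_s_type_instruction : Prop := ∀ (rs1 : Int) (rs2 : Int) (imm : Int), Dom_s_type_instruction rs1 rs2 imm → Spec_s_type_instruction rs1 rs2 imm (s_type_instruction rs1 rs2 imm)

-- ===== LEMMAS AND PROOFS =====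

-- `ldiff (2^n - 1) r` is complement within n bits
theorem ldiff_two_pow_sub_one (n : Nat) : ∀ r : Nat, r < 2 ^ n → Nat.ldiff (2 ^ n - 1) r = 2 ^ n - 1 - r := by
  induction n with
  | zero =>
    intro r hr
    interval_cases r
    apply Nat.eq_of_testBit_eq
    simp [Nat.testBit_ldiff]
  | succ n ih =>
    intro r hr
    have h1 : (2 ^ (n + 1) - 1 : Nat) = Nat.bit true (2 ^ n - 1) := by
      simp [Nat.bit_val]
      have : 1 ≤ 2 ^ n := Nat.one_le_two_pow
      omega
    have h2 : Nat.bit (Nat.bodd r) (Nat.div2 r) = r := Nat.bit_bodd_div2 r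
    have hdiv : r / 2 < 2 ^ n := by
      have : 2 ^ (n + 1) = 2 * 2 ^ n := by ring
      omega
    have hih := ih (r / 2) hdiv
    have hb := Nat.bodd_add_div2 r
    rw [h1, ← h2, Nat.ldiff_bit]
    cases hr2 : Nat.bodd r <;>
      simp [hr2, Nat.bit_val, Nat.div2_val, hih] at hb ⊢ <;>
      · have : 1 ≤ 2 ^ n := Nat.one_le_two_pow
        omega

-- ldiff against a full n-bit mask only sees the low n bits
theorem ldiff_mask_mod (n m : Nat) : Nat.ldiff (2 ^ n - 1) m = Nat.ldiff (2 ^ n - 1) (m % 2 ^ n) := by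
  apply Nat.eq_of_testBit_eq
  intro k
  rw [Nat.testBit_ldiff, Nat.testBit_ldiff, Nat.testBit_two_pow_sub_one, Nat.testBit_mod_two_pow]
  by_cases hk : k < n <;> simp [hk]

-- Python `z & (2^n - 1)` = floor-mod 2^n (two's complement, both in Python and in Int.land)
theorem land_pow_emod (n : Nat) (z : Int) :
    Int.land z ((2 ^ n - 1 : Nat) : Int) = z % ((2 ^ n : Nat) : Int) := by
  have hP : 0 < (2 : Nat) ^ n := Nat.two_pow_pos n
  cases z with
  | ofNat m =>
    show ((m &&& (2 ^ n - 1) : Nat) : Int) = _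
    rw [Nat.and_two_pow_sub_one_eq_mod m n, Int.ofNat_eq_natCast]
    push_cast
    rfl
  | negSucc m =>
    show ((Nat.ldiff (2 ^ n - 1) m : Nat) : Int) = _
    rw [ldiff_mask_mod, ldiff_two_pow_sub_one n _ (Nat.mod_lt _ hP), Int.negSucc_eq]
    have hr : m % 2 ^ n < 2 ^ n := Nat.mod_lt _ hP
    have hq : 2 ^ n * (m / 2 ^ n) + m % 2 ^ n = m := Nat.div_add_mod m (2 ^ n)
    have hcast : ((2 ^ n - 1 - m % 2 ^ n : Nat) : Int)
        = ((2 ^ n : Nat) : Int) - 1 - ((m % 2 ^ n : Nat) : Int) := by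
      have h1 : m % 2 ^ n ≤ 2 ^ n - 1 := by omega
      push_cast [Nat.cast_sub h1, Nat.cast_sub (by omega : (1 : Nat) ≤ 2 ^ n)]
      ring
    rw [hcast]
    have hr' : ((m % 2 ^ n : Nat) : Int) < ((2 ^ n : Nat) : Int) := by exact_mod_cast hr
    have hr0 : (0 : Int) ≤ ((m % 2 ^ n : Nat) : Int) := by positivity
    have hP' : (1 : Int) ≤ ((2 ^ n : Nat) : Int) := by exact_mod_cast hP
    have heq : ((2 : Int)) ^ n * ((m / 2 ^ n : Nat) : Int) + ((m % 2 ^ n : Nat) : Int) = (m : Int) := by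
      exact_mod_cast hq
    have h1 : -((m : Int) + 1)
        = (((2 ^ n : Nat) : Int) - 1 - ((m % 2 ^ n : Nat) : Int))
          + ((2 ^ n : Nat) : Int) * (-(((m / 2 ^ n : Nat) : Int)) - 1) := by
      push_cast
      push_cast at heq
      linarith
    rw [h1, Int.add_mul_emod_self_left _ _ _]
    refine ((Int.emod_eq_of_lt ?_ ?_).symm) <;> linarith

theorem land_4095_eq_emod (z : Int) : Int.land z 4095 = z % 4096 := by
  have h := land_pow_emod 12 z
  norm_num at h
  exact h

theorem land_31_eq_emod (z : Int) : Int.land z 31 = z % 32 := by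
  have h := land_pow_emod 5 z
  norm_num at h
  exact h

theorem land_127_eq_emod (z : Int) : Int.land z 127 = z % 128 := by
  have h := land_pow_emod 7 z
  norm_num at h
  exact h

-- value of the raw parse fold with an arbitrary accumulator
def parse0 (l : List Char) : Int :=
  l.foldl (fun a c => 2 * a + (if c = '1' then 1 else 0)) 0

theorem parse_foldl_acc (l : List Char) : ∀ a : Int,
    l.foldl (fun a c => 2 * a + (if c = '1' then 1 else 0)) a = a * 2 ^ l.length + parse0 l := by
  induction l with
  | nil => intro a; simp [parse0]
  | cons c t ih =>
    intro a
    simp only [List.foldl_cons, List.length_cons, parse0]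
    rw [ih, ih (2 * 0 + _)]
    ring

theorem parse0_cons (c : Char) (t : List Char) :
    parse0 (c :: t) = (if c = '1' then 1 else 0) * 2 ^ t.length + parse0 t := by
  simp only [parse0, List.foldl_cons]
  rw [parse_foldl_acc]
  simp only [parse0]
  split <;> ring

theorem parse0_replicate_append (k : Nat) (l : List Char) :
    parse0 (List.replicate k '0' ++ l) = parse0 l := by
  induction k with
  | zero => simp
  | succ k ih => simpa [List.replicate_succ, parse0_cons] using ih

-- parse0 inverts pyBits
theorem parse0_pyBits (n : Nat) : parse0 (pyBits n) = n := by
  unfold pyBits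
  have h2 : (1 : Nat) < 2 := by norm_num
  conv_rhs => rw [← Nat.ofDigits_digits 2 n]
  generalize hd : Nat.digits 2 n = ds
  have hlt : ∀ d ∈ ds, d < 2 := by intro d hdmem; exact Nat.digits_lt_base h2 (hd ▸ hdmem)
  clear hd
  induction ds with
  | nil => simp [parse0]
  | cons d t ih =>
    simp only [List.map_cons, List.reverse_cons, parse0, List.foldl_append, List.foldl_cons,
      List.foldl_nil, Nat.ofDigits_cons]
    have hih := ih (fun d hm => hlt d (List.mem_cons_of_mem _ hm))
    simp only [parse0] at hih
    rw [hih]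
    have hd2 : d < 2 := hlt d List.mem_cons_self
    interval_cases d <;> push_cast <;> ring

-- pyBits characters are binary digits
theorem pyBits_chars (n : Nat) : ∀ c ∈ pyBits n, c = '0' ∨ c = '1' := by
  intro c hc
  unfold pyBits at hc
  rw [List.mem_reverse, List.mem_map] at hc
  obtain ⟨d, _, hd⟩ := hc
  by_cases h : d = 1
  · right; rw [← hd, if_pos h]
  · left; rw [← hd, if_neg h]

theorem binary_chars_no_prefix (l : List Char) (h : ∀ c ∈ l, c = '0' ∨ c = '1') :
    ¬ (l.take 2 = ['0', 'b']) := by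
  intro htake
  have hb : 'b' ∈ l.take 2 := by rw [htake]; simp
  have := h 'b' (List.mem_of_mem_take hb)
  simp at this

-- parsing a format of a nonnegative int round-trips
theorem pyParseBin_pyFormatB (z : Int) (hz : 0 ≤ z) (w : Nat) :
    pyParseBin (pyFormatB z w) = z := by
  unfold pyFormatB
  rw [if_neg (by omega)]
  unfold pyParseBin
  simp only [String.toList_ofList]
  have hchars : ∀ c ∈ List.replicate (w - (pyBits z.toNat).length) '0' ++ pyBits z.toNat,
      c = '0' ∨ c = '1' := by
    intro c hc
    rcases List.mem_append.mp hc with h | h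
    · left; exact List.eq_of_mem_replicate h
    · exact pyBits_chars _ c h
  rw [if_neg (binary_chars_no_prefix _ hchars)]
  show parse0 _ = z
  rw [parse0_replicate_append, parse0_pyBits]
  omega

-- inverting every bit character complements the parsed value within the string length
theorem parse0_invert (l : List Char) (h : ∀ c ∈ l, c = '0' ∨ c = '1') :
    parse0 (l.map (fun bit => if bit = '0' then '1' else '0')) = 2 ^ l.length - 1 - parse0 l := by
  induction l with
  | nil => simp [parse0]
  | cons c t ih =>
    have hih := ih (fun d hm => h d (List.mem_cons_of_mem _ hm))
    simp only [List.map_cons, parse0_cons, List.length_map, List.length_cons]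
    rw [hih]
    rcases h c List.mem_cons_self with hc | hc <;> simp [hc, pow_succ] <;> ring

-- pyBits length for values below 2^12
theorem pyBits_length_le (n : Nat) (h : n < 4096) : (pyBits n).length ≤ 12 := by
  unfold pyBits
  simp only [List.length_reverse, List.length_map]
  rcases Nat.eq_zero_or_pos n with h0 | h0
  · simp [h0]
  · have hle := Nat.base_pow_length_digits_le 2 n (by norm_num) (by omega)
    by_contra hgt
    push_neg at hgt
    have : (2 : Nat) ^ 13 ≤ 2 ^ (Nat.digits 2 n).length := Nat.pow_le_pow_right (by norm_num) hgt
    omega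

-- the value A's immediate-encoding branch computes
theorem immA_value (imm : Int) :
    pyParseBin (if imm ≥ 0 then
      pyFormatB (Int.land imm 4095) 12
    else
      pyBin (pyParseBin (String.ofList ((pyFormatB (Int.land (-imm) 4095) 12).toList.map
        (fun bit => if bit = '0' then '1' else '0'))) + 1)) =
    if imm ≥ 0 ∨ imm % 4096 ≠ 0 then imm % 4096 else 4096 := by
  by_cases himm : imm ≥ 0
  · rw [if_pos himm, if_pos (Or.inl himm), pyParseBin_pyFormatB _ (by
      rw [land_4095_eq_emod]; exact Int.emod_nonneg _ (by norm_num)) 12,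
      land_4095_eq_emod]
  · rw [if_neg himm]
    set x : Int := Int.land (-imm) 4095 with hxdef
    have hx : x = (-imm) % 4096 := land_4095_eq_emod _
    have hx0 : 0 ≤ x := hx ▸ Int.emod_nonneg _ (by norm_num)
    have hx1 : x < 4096 := hx ▸ Int.emod_lt_of_pos _ (by norm_num)
    -- the 12-char zero-padded string of x
    have hfmt : (pyFormatB x 12).toList
        = List.replicate (12 - (pyBits x.toNat).length) '0' ++ pyBits x.toNat := by
      unfold pyFormatB; rw [if_neg (by omega)]; simp
    have hlen : ((pyFormatB x 12).toList).length = 12 := by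
      rw [hfmt]
      have := pyBits_length_le x.toNat (by omega)
      simp [List.length_replicate]
      omega
    have hchars : ∀ c ∈ (pyFormatB x 12).toList, c = '0' ∨ c = '1' := by
      rw [hfmt]; intro c hc
      rcases List.mem_append.mp hc with h | h
      · left; exact List.eq_of_mem_replicate h
      · exact pyBits_chars _ c h
    -- parse of the inverted string
    have hparse_s : parse0 ((pyFormatB x 12).toList) = x := by
      rw [hfmt, parse0_replicate_append, parse0_pyBits]; omega
    have hinv : pyParseBin (String.ofList ((pyFormatB x 12).toList.map
        (fun bit => if bit = '0' then '1' else '0'))) = 4095 - x := by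
      unfold pyParseBin
      simp only [String.toList_ofList]
      have hchars' : ∀ c ∈ (pyFormatB x 12).toList.map (fun bit => if bit = '0' then '1' else '0'),
          c = '0' ∨ c = '1' := by
        intro c hc
        rw [List.mem_map] at hc
        obtain ⟨d, _, hd⟩ := hc
        by_cases h : d = '0' <;> simp [h] at hd <;> simp [← hd]
      rw [if_neg (binary_chars_no_prefix _ hchars')]
      show parse0 _ = _
      rw [parse0_invert _ hchars, hparse_s, hlen]
      norm_num
    rw [hinv]
    -- bin(4095 - x + 1) = "0b" ++ bits, parsed back
    have hpos : (0 : Int) < 4095 - x + 1 := by omega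
    have hbin : pyParseBin (pyBin (4095 - x + 1)) = 4096 - x := by
      unfold pyBin
      rw [if_neg (by omega)]
      unfold pyParseBin
      simp only [String.toList_ofList]
      have hne : (4095 - x + 1).toNat ≠ 0 := by omega
      rw [if_neg hne]
      rw [if_pos (show List.take 2 ('0' :: 'b' :: pyBits (4095 - x + 1).toNat) = ['0', 'b'] by simp)]
      show parse0 (List.drop 2 _) = _
      rw [List.drop_succ_cons, List.drop_succ_cons, List.drop_zero, parse0_pyBits]
      omega
    rw [hbin, hx]
    by_cases hz : imm % 4096 = 0
    · rw [if_neg (by simp [himm, hz])]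
      omega
    · rw [if_pos (Or.inr hz)]
      omega

-- ===== VERDICT (by name: the statement is the Claim_ definition above) =====
theorem s_type_instruction_spec : Claim_equal_s_type_instruction := by
  intro rs1 rs2 imm _
  show s_type_instruction rs1 rs2 imm = s_type_instruction_alt rs1 rs2 imm
  simp only [s_type_instruction, s_type_instruction_alt]
  rw [immA_value imm]
  rw [land_4095_eq_emod imm]
  by_cases h : imm ≥ 0 ∨ imm % 4096 ≠ 0
  · rw [if_pos h]
  · rw [if_neg h]
    push_neg at h
    rw [h.2]
    rw [show (Int.fdiv 4096 32).land 127 = Int.land 0 127 from by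
        rw [land_127_eq_emod, land_127_eq_emod]; decide,
      show Int.land 4096 31 = Int.land 0 31 from by
        rw [land_31_eq_emod, land_31_eq_emod]; decide,
      show (Int.fdiv 0 32).land 127 = Int.land 0 127 from by
        rw [land_127_eq_emod, land_127_eq_emod]; decide]
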